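-- pv_equiv track=rewrite | github.com/abdullah956/tools | management/ai_tool_recommender/ai_agents/tools/internet_search/service.py | _extract_category_from_title
-- ===== SOURCE A (Python) =====
-- def _extract_category_from_title(title: str) -> str:
--     """Extract category from title."""
--     title_lower = title.lower()
--
--     if any(word in title_lower for word in ["video", "editing", "editor"]):
--         return "Video Editing"
--     elif any(word in title_lower for word in ["content", "writing", "copy"]):
--         return "Content Creation"
--     elif any(word in title_lower for word in ["image", "photo", "graphic"]):
--         return "Image Processing"
--     elif any(word in title_lower for word in ["automation", "workflow"]):
--         return "Automation"
--     else:
--         return "AI Tool"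
-- ===== SOURCE B (Python) =====
-- _KEYWORD_RANK = {
--     "video": 0, "editing": 0, "editor": 0,
--     "content": 1, "writing": 1, "copy": 1,
--     "image": 2, "photo": 2, "graphic": 2,
--     "automation": 3, "workflow": 3,
-- }
--
-- _CATEGORIES = ["Video Editing", "Content Creation", "Image Processing", "Automation", "AI Tool"]
--
--
-- def _extract_category_from_title(title: str) -> str:
--     """Single pass over the title's positions: at each position, note any keyword
--     starting there and keep the minimal category rank seen; index the category table."""
--     t = title.lower()
--     best = 4
--     for i in range(len(t)):
--         for kw, rank in _KEYWORD_RANK.items():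
--             if rank < best and t.startswith(kw, i):
--                 best = rank
--     return _CATEGORIES[best]
-- ===== Notes on version B (the rewrite author's own statement) =====
-- stated objective: alternative
-- what changed: Instead of four per-category substring searches with early return, B makes a single left-to-right scan over the title's positions, keeping the minimal category rank of any keyword starting at each position (via a flat keyword-to-rank map), and indexes a category table with the final rank.
import Mathlib
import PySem

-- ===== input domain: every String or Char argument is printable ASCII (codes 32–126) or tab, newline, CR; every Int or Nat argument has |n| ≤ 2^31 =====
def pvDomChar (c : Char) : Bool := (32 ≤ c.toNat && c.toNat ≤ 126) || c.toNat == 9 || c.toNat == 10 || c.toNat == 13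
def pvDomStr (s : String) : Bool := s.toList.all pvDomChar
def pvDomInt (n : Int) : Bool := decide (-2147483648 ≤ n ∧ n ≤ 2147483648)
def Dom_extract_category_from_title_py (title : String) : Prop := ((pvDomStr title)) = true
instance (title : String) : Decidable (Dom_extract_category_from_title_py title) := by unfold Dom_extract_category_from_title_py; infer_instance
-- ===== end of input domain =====

-- B replaces A's four per-category substring branches by a single scan over the title's positions keeping the minimal matched keyword rank (alternative algorithm, same cost).


-- ===== PORT A =====
def extract_category_from_title_py (title : String) : String :=
  let title_lower := PySem.Str.lower title
  if ["video", "editing", "editor"].any (fun word => PySem.Str.isIn word title_lower) then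
    "Video Editing"
  else if ["content", "writing", "copy"].any (fun word => PySem.Str.isIn word title_lower) then
    "Content Creation"
  else if ["image", "photo", "graphic"].any (fun word => PySem.Str.isIn word title_lower) then
    "Image Processing"
  else if ["automation", "workflow"].any (fun word => PySem.Str.isIn word title_lower) then
    "Automation"
  else
    "AI Tool"

-- ===== PORT B =====
-- the flat keyword -> rank map (dict, iterated in insertion order)
def pvKeywordRank : List (String × Nat) :=
  [("video", 0), ("editing", 0), ("editor", 0),
   ("content", 1), ("writing", 1), ("copy", 1),
   ("image", 2), ("photo", 2), ("graphic", 2),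
   ("automation", 3), ("workflow", 3)]

def pvCategories : List String :=
  ["Video Editing", "Content Creation", "Image Processing", "Automation", "AI Tool"]

-- inner loop body; Python's t.startswith(kw, i) with 0 ≤ i ≤ len(t) is exactly
-- kw.toList.isPrefixOf (chars.drop i) on the character list
def pvBestStep (chars : List Char) (best : Nat) (i : Nat) : Nat :=
  pvKeywordRank.foldl
    (fun b kwr => if kwr.2 < b && kwr.1.toList.isPrefixOf (chars.drop i) then kwr.2 else b)
    best

def extract_category_from_title_py_alt (title : String) : String :=
  let chars := (PySem.Str.lower title).toList
  let best := (List.range chars.length).foldl (pvBestStep chars) 4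
  pvCategories.getD best "AI Tool"   -- _CATEGORIES[best]; best ≤ 4 always, so in range

-- ===== PRECONDITION & SPEC =====
def Spec_extract_category_from_title_py (title : String) (out : String) : Prop := out = extract_category_from_title_py_alt title
instance (title : String) (out : String) : Decidable (Spec_extract_category_from_title_py title out) := by unfold Spec_extract_category_from_title_py; infer_instance

-- ===== CLAIM (what is proved, stated in full; the proofs are below) =====
def Claim_equal_extract_category_from_title_py : Prop := ∀ (title : String), Dom_extract_category_from_title_py title → Spec_extract_category_from_title_py title (extract_category_from_title_py title)

-- ===== LEMMAS AND PROOFS =====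

-- whether some keyword of rank 0/1/2/3 starts at position i
def pvHit0 (chars : List Char) (i : Nat) : Bool :=
  "video".toList.isPrefixOf (chars.drop i) || "editing".toList.isPrefixOf (chars.drop i) || "editor".toList.isPrefixOf (chars.drop i)
def pvHit1 (chars : List Char) (i : Nat) : Bool :=
  "content".toList.isPrefixOf (chars.drop i) || "writing".toList.isPrefixOf (chars.drop i) || "copy".toList.isPrefixOf (chars.drop i)
def pvHit2 (chars : List Char) (i : Nat) : Bool :=
  "image".toList.isPrefixOf (chars.drop i) || "photo".toList.isPrefixOf (chars.drop i) || "graphic".toList.isPrefixOf (chars.drop i)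
def pvHit3 (chars : List Char) (i : Nat) : Bool :=
  "automation".toList.isPrefixOf (chars.drop i) || "workflow".toList.isPrefixOf (chars.drop i)

-- first-match rank of the four boolean hits
def pvChain (b0 b1 b2 b3 : Bool) : Nat :=
  if b0 then 0 else if b1 then 1 else if b2 then 2 else if b3 then 3 else 4

-- the guarded-update step is a min: pulling a min out of the start accumulator
theorem pv_guard_min (chars : List Char) (i : Nat) (l : List (String × Nat)) :
    ∀ b c : Nat,
      l.foldl (fun b kwr => if kwr.2 < b && kwr.1.toList.isPrefixOf (chars.drop i) then kwr.2 else b) (min b c)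
        = min b (l.foldl (fun b kwr => if kwr.2 < b && kwr.1.toList.isPrefixOf (chars.drop i) then kwr.2 else b) c) := by
  induction l with
  | nil => intro b c; rfl
  | cons a l ih =>
      intro b c
      have h : (if a.2 < min b c && a.1.toList.isPrefixOf (chars.drop i) then a.2 else min b c)
          = min b (if a.2 < c && a.1.toList.isPrefixOf (chars.drop i) then a.2 else c) := by
        cases hQ : a.1.toList.isPrefixOf (chars.drop i)
        · simp
        · simp only [Bool.and_true]
          split_ifs <;> simp_all only [decide_eq_true_eq] <;> omega
      simp only [List.foldl_cons, h, ih]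

theorem pvBestStep_le (chars : List Char) (i : Nat) : pvBestStep chars 4 i ≤ 4 := by
  unfold pvBestStep
  have h := pv_guard_min chars i pvKeywordRank 4 4
  rw [Nat.min_self] at h
  omega

theorem pvBestStep_min (chars : List Char) (i : Nat) (b : Nat) (hb : b ≤ 4) :
    pvBestStep chars b i = min b (pvBestStep chars 4 i) := by
  unfold pvBestStep
  conv_lhs => rw [← Nat.min_eq_left hb]
  exact pv_guard_min chars i pvKeywordRank b 4

-- per-rank-group evaluation of the inner loop
theorem pv_g0 (chars : List Char) (i : Nat) (b : Nat) :
    List.foldl (fun b kwr => if kwr.2 < b && kwr.1.toList.isPrefixOf (chars.drop i) then kwr.2 else b) b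
      [("video", 0), ("editing", 0), ("editor", 0)]
      = if 0 < b && pvHit0 chars i then 0 else b := by
  simp only [List.foldl_cons, List.foldl_nil, pvHit0]
  by_cases h1 : "video".toList.isPrefixOf (chars.drop i) = true <;>
  by_cases h2 : "editing".toList.isPrefixOf (chars.drop i) = true <;>
  by_cases h3 : "editor".toList.isPrefixOf (chars.drop i) = true <;>
  all_goals simp_all
  all_goals (first | omega | (split_ifs <;> omega))

theorem pv_g1 (chars : List Char) (i : Nat) (b : Nat) :
    List.foldl (fun b kwr => if kwr.2 < b && kwr.1.toList.isPrefixOf (chars.drop i) then kwr.2 else b) b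
      [("content", 1), ("writing", 1), ("copy", 1)]
      = if 1 < b && pvHit1 chars i then 1 else b := by
  simp only [List.foldl_cons, List.foldl_nil, pvHit1]
  by_cases h1 : "content".toList.isPrefixOf (chars.drop i) = true <;>
  by_cases h2 : "writing".toList.isPrefixOf (chars.drop i) = true <;>
  by_cases h3 : "copy".toList.isPrefixOf (chars.drop i) = true <;>
  all_goals simp_all
  all_goals (first | omega | (split_ifs <;> omega))

theorem pv_g2 (chars : List Char) (i : Nat) (b : Nat) :
    List.foldl (fun b kwr => if kwr.2 < b && kwr.1.toList.isPrefixOf (chars.drop i) then kwr.2 else b) b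
      [("image", 2), ("photo", 2), ("graphic", 2)]
      = if 2 < b && pvHit2 chars i then 2 else b := by
  simp only [List.foldl_cons, List.foldl_nil, pvHit2]
  by_cases h1 : "image".toList.isPrefixOf (chars.drop i) = true <;>
  by_cases h2 : "photo".toList.isPrefixOf (chars.drop i) = true <;>
  by_cases h3 : "graphic".toList.isPrefixOf (chars.drop i) = true <;>
  all_goals simp_all
  all_goals (first | omega | (split_ifs <;> omega))

theorem pv_g3 (chars : List Char) (i : Nat) (b : Nat) :
    List.foldl (fun b kwr => if kwr.2 < b && kwr.1.toList.isPrefixOf (chars.drop i) then kwr.2 else b) b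
      [("automation", 3), ("workflow", 3)]
      = if 3 < b && pvHit3 chars i then 3 else b := by
  simp only [List.foldl_cons, List.foldl_nil, pvHit3]
  by_cases h1 : "automation".toList.isPrefixOf (chars.drop i) = true <;>
  by_cases h2 : "workflow".toList.isPrefixOf (chars.drop i) = true <;>
  all_goals simp_all
  all_goals (first | omega | (split_ifs <;> omega))

theorem pvBestStep_eq_chain (chars : List Char) (i : Nat) :
    pvBestStep chars 4 i = pvChain (pvHit0 chars i) (pvHit1 chars i) (pvHit2 chars i) (pvHit3 chars i) := by
  have hsplit : pvKeywordRank
      = [("video", 0), ("editing", 0), ("editor", 0)] ++ [("content", 1), ("writing", 1), ("copy", 1)]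
        ++ [("image", 2), ("photo", 2), ("graphic", 2)] ++ [("automation", 3), ("workflow", 3)] := rfl
  unfold pvBestStep
  rw [hsplit, List.foldl_append, List.foldl_append, List.foldl_append,
    pv_g0, pv_g1, pv_g2, pv_g3]
  generalize pvHit0 chars i = b0
  generalize pvHit1 chars i = b1
  generalize pvHit2 chars i = b2
  generalize pvHit3 chars i = b3
  cases b0 <;> cases b1 <;> cases b2 <;> cases b3 <;> rfl

theorem pvChain_min : ∀ x0 x1 x2 x3 y0 y1 y2 y3 : Bool,
    min (pvChain x0 x1 x2 x3) (pvChain y0 y1 y2 y3)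
      = pvChain (x0 || y0) (x1 || y1) (x2 || y2) (x3 || y3) := by decide

theorem pvChain_le : ∀ b0 b1 b2 b3 : Bool, pvChain b0 b1 b2 b3 ≤ 4 := by decide

-- the position loop computes the first-match rank of the "matches anywhere" bits
theorem pv_outer (chars : List Char) :
    ∀ (l : List Nat) (b : Nat), b ≤ 4 →
      l.foldl (pvBestStep chars) b
        = min b (pvChain (l.any (pvHit0 chars)) (l.any (pvHit1 chars)) (l.any (pvHit2 chars)) (l.any (pvHit3 chars))) := by
  intro l
  induction l with
  | nil => intro b hb; simp [pvChain]; omega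
  | cons i l ih =>
      intro b hb
      have hg := pvBestStep_le chars i
      have hstep := pvBestStep_min chars i b hb
      have hacc : pvBestStep chars b i ≤ 4 := by rw [hstep]; omega
      calc (i :: l).foldl (pvBestStep chars) b
          = l.foldl (pvBestStep chars) (pvBestStep chars b i) := List.foldl_cons ..
        _ = min (pvBestStep chars b i)
              (pvChain (l.any (pvHit0 chars)) (l.any (pvHit1 chars)) (l.any (pvHit2 chars)) (l.any (pvHit3 chars))) := ih _ hacc
        _ = min b (min (pvBestStep chars 4 i)
              (pvChain (l.any (pvHit0 chars)) (l.any (pvHit1 chars)) (l.any (pvHit2 chars)) (l.any (pvHit3 chars)))) := by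
              rw [hstep, Nat.min_assoc]
        _ = _ := by
              rw [pvBestStep_eq_chain, pvChain_min]
              simp [List.any_cons]

-- a nonempty pattern starts at some position of the range iff it is a substring
theorem pv_any_range_prefix (sub chars : List Char) (h : sub ≠ []) :
    (List.range chars.length).any (fun i => sub.isPrefixOf (chars.drop i))
      = PySem.Chars.isIn sub chars := by
  by_cases hin : PySem.Chars.isIn sub chars = true
  · rw [hin, List.any_eq_true]
    obtain ⟨j, hj⟩ := (PySem.Chars.exists_prefix_drop_iff_isIn sub chars).mpr hin
    have hjlt : j < chars.length := by
      by_contra hge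
      have hnil : chars.drop j = [] := List.drop_eq_nil_of_le (by omega)
      rw [hnil] at hj
      exact h (List.prefix_nil.mp hj)
    exact ⟨j, List.mem_range.mpr hjlt, List.isPrefixOf_iff_prefix.mpr hj⟩
  · have hfalse : PySem.Chars.isIn sub chars = false := by
      cases hx : PySem.Chars.isIn sub chars
      · rfl
      · exact absurd hx hin
    rw [hfalse, List.any_eq_false]
    intro i _ hpre
    exact hin ((PySem.Chars.exists_prefix_drop_iff_isIn sub chars).mp
      ⟨i, List.isPrefixOf_iff_prefix.mp hpre⟩)

theorem pv_any_or3 (l : List Nat) (p q r : Nat → Bool) :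
    l.any (fun i => p i || q i || r i) = (l.any p || l.any q || l.any r) := by
  induction l with
  | nil => rfl
  | cons a l ih => cases hp : p a <;> cases hq : q a <;> cases hr : r a <;>
      simp [List.any_cons, hp, hq, hr, ih]

theorem pv_any_or2 (l : List Nat) (p q : Nat → Bool) :
    l.any (fun i => p i || q i) = (l.any p || l.any q) := by
  induction l with
  | nil => rfl
  | cons a l ih => cases hp : p a <;> cases hq : q a <;>
      simp [List.any_cons, hp, hq, ih]

theorem pv_range_hit0 (chars : List Char) :
    (List.range chars.length).any (pvHit0 chars)
      = (PySem.Chars.isIn "video".toList chars || PySem.Chars.isIn "editing".toList chars || PySem.Chars.isIn "editor".toList chars) := by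
  rw [show pvHit0 chars = (fun i => "video".toList.isPrefixOf (chars.drop i) || "editing".toList.isPrefixOf (chars.drop i) || "editor".toList.isPrefixOf (chars.drop i)) from rfl,
    pv_any_or3, pv_any_range_prefix _ _ (by decide), pv_any_range_prefix _ _ (by decide), pv_any_range_prefix _ _ (by decide)]

theorem pv_range_hit1 (chars : List Char) :
    (List.range chars.length).any (pvHit1 chars)
      = (PySem.Chars.isIn "content".toList chars || PySem.Chars.isIn "writing".toList chars || PySem.Chars.isIn "copy".toList chars) := by
  rw [show pvHit1 chars = (fun i => "content".toList.isPrefixOf (chars.drop i) || "writing".toList.isPrefixOf (chars.drop i) || "copy".toList.isPrefixOf (chars.drop i)) from rfl,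
    pv_any_or3, pv_any_range_prefix _ _ (by decide), pv_any_range_prefix _ _ (by decide), pv_any_range_prefix _ _ (by decide)]

theorem pv_range_hit2 (chars : List Char) :
    (List.range chars.length).any (pvHit2 chars)
      = (PySem.Chars.isIn "image".toList chars || PySem.Chars.isIn "photo".toList chars || PySem.Chars.isIn "graphic".toList chars) := by
  rw [show pvHit2 chars = (fun i => "image".toList.isPrefixOf (chars.drop i) || "photo".toList.isPrefixOf (chars.drop i) || "graphic".toList.isPrefixOf (chars.drop i)) from rfl,
    pv_any_or3, pv_any_range_prefix _ _ (by decide), pv_any_range_prefix _ _ (by decide), pv_any_range_prefix _ _ (by decide)]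

theorem pv_range_hit3 (chars : List Char) :
    (List.range chars.length).any (pvHit3 chars)
      = (PySem.Chars.isIn "automation".toList chars || PySem.Chars.isIn "workflow".toList chars) := by
  rw [show pvHit3 chars = (fun i => "automation".toList.isPrefixOf (chars.drop i) || "workflow".toList.isPrefixOf (chars.drop i)) from rfl,
    pv_any_or2, pv_any_range_prefix _ _ (by decide), pv_any_range_prefix _ _ (by decide)]

theorem pv_getD_chain : ∀ s0 s1 s2 s3 : Bool,
    pvCategories.getD (pvChain s0 s1 s2 s3) "AI Tool"
      = (if s0 then "Video Editing" else if s1 then "Content Creation"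
         else if s2 then "Image Processing" else if s3 then "Automation" else "AI Tool") := by
  decide

-- ===== VERDICT (by name: the statement is the Claim_ definition above) =====
theorem extract_category_from_title_py_spec : Claim_equal_extract_category_from_title_py := by
  intro title _
  show (if ["video", "editing", "editor"].any (fun word => PySem.Str.isIn word (PySem.Str.lower title)) then "Video Editing"
    else if ["content", "writing", "copy"].any (fun word => PySem.Str.isIn word (PySem.Str.lower title)) then "Content Creation"
    else if ["image", "photo", "graphic"].any (fun word => PySem.Str.isIn word (PySem.Str.lower title)) then "Image Processing"
    else if ["automation", "workflow"].any (fun word => PySem.Str.isIn word (PySem.Str.lower title)) then "Automation"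
    else "AI Tool")
    = pvCategories.getD
        ((List.range (PySem.Str.lower title).toList.length).foldl (pvBestStep (PySem.Str.lower title).toList) 4) "AI Tool"
  rw [pv_outer (PySem.Str.lower title).toList (List.range (PySem.Str.lower title).toList.length) 4 (le_refl 4),
    Nat.min_eq_right (pvChain_le _ _ _ _),
    pv_range_hit0, pv_range_hit1, pv_range_hit2, pv_range_hit3, pv_getD_chain]
  simp [List.any_cons, List.any_nil, PySem.Str.isIn_eq, or_assoc]
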